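-- pv_equiv track=rewrite | github.com/j-mroz/Algorithms-leetcode | codility/lessons/14_binary_search/nailing_planks_v2.py | all_planks_nailed
-- ===== SOURCE A (Python) =====
-- from bisect import bisect_left, bisect_right
--
-- def lower_bound(arr, x):
--     return bisect_left(arr, x)
--
-- def upper_bound(arr, x):
--     return bisect_right(arr, x)
--
-- def all_planks_nailed(planks, nails):
--     nails.sort()
--     nailed_planks_count = 0
--
--     for plank in planks:
--         plank_start, plank_end = plank
--         nails_start = lower_bound(nails, plank_start)
--         nails_end = upper_bound(nails, plank_end)
--         if nails_start < nails_end: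
--             nailed_planks_count += 1
--
--     return nailed_planks_count == len(planks)
-- ===== SOURCE B (Python) =====
-- def all_planks_nailed(planks, nails):
--     # Merge-sweep: sort nails (in place, like A) and walk planks in start order
--     # with a single forward-only pointer into nails.
--     nails.sort()
--     ok = True
--     j = 0
--     for s, e in sorted(planks, key=lambda p: p[0]):
--         while j < len(nails) and nails[j] < s:
--             j += 1
--         ok = ok and j < len(nails) and nails[j] <= e
--     return ok
-- ===== Notes on version B (the rewrite author's own statement) =====
-- stated objective: alternative
-- what changed: Replaces per-plank binary searches (bisect_left/bisect_right on sorted nails) with a merge-style sweep: planks are walked in start order while one forward-only pointer advances through the sorted nails; a plank is nailed iff the first nail not below its start lies within it.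
import Mathlib
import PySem

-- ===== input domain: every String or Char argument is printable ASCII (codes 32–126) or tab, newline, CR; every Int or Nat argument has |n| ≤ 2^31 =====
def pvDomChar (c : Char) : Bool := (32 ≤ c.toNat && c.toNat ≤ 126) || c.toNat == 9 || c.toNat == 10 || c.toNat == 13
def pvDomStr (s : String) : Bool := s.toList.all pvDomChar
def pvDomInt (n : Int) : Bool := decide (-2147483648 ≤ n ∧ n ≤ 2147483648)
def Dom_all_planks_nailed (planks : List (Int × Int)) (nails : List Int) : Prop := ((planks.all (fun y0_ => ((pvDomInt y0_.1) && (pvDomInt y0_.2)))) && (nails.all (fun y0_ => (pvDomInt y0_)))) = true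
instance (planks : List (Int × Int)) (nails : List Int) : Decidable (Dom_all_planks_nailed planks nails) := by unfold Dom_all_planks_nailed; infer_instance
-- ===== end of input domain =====

-- B replaces A's per-plank binary searches by a merge-style sweep over start-sorted
-- planks with one forward-only pointer into the sorted nails (objective: alternative).
-- Both A and B sort `nails` in place; the equivalence proved is about the return value.

-- ===== PORT A =====
def lower_bound (arr : List Int) (x : Int) : Nat := PySem.List.bisectLeft arr x

def upper_bound (arr : List Int) (x : Int) : Nat := PySem.List.bisectRight arr x

def all_planks_nailed (planks : List (Int × Int)) (nails : List Int) : Bool :=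
  let ns := PySem.List.sorted nails (fun x => x)      -- nails.sort()
  let cnt : Int := planks.foldl (fun acc plank =>
    let plank_start := plank.1
    let plank_end := plank.2
    let nails_start := lower_bound ns plank_start
    let nails_end := upper_bound ns plank_end
    if nails_start < nails_end then acc + 1 else acc) 0
  decide (cnt = (planks.length : Int))

-- ===== PORT B =====
-- while j < len(nails) and nails[j] < s: j += 1
def pvAdvance (ns : List Int) (s : Int) (j : Nat) : Nat :=
  if h : j < ns.length ∧ ns.getD j 0 < s then pvAdvance ns s (j + 1) else j
termination_by ns.length - j
decreasing_by omega

def all_planks_nailed_alt (planks : List (Int × Int)) (nails : List Int) : Bool :=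
  let ns := PySem.List.sorted nails (fun x => x)      -- nails.sort()
  let sp := PySem.List.sorted planks (fun p => p.1)   -- sorted(planks, key=lambda p: p[0])
  let st := sp.foldl (fun (st : Nat × Bool) p =>
    let j := pvAdvance ns p.1 st.1
    (j, st.2 && (decide (j < ns.length) && decide (ns.getD j 0 ≤ p.2)))) (0, true)
  st.2

-- ===== PRECONDITION & SPEC =====
def Spec_all_planks_nailed (planks : List (Int × Int)) (nails : List Int) (out : Bool) : Prop := out = all_planks_nailed_alt planks nails
instance (planks : List (Int × Int)) (nails : List Int) (out : Bool) : Decidable (Spec_all_planks_nailed planks nails out) := by unfold Spec_all_planks_nailed; infer_instance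

-- ===== CLAIM (what is proved, stated in full; the proofs are below) =====
def Claim_equal_all_planks_nailed : Prop := ∀ (planks : List (Int × Int)) (nails : List Int), Dom_all_planks_nailed planks nails → Spec_all_planks_nailed planks nails (all_planks_nailed planks nails)

-- ===== LEMMAS AND PROOFS =====

-- the shared semantic predicate: plank p has some nail of ns in [p.1, p.2]
def pvNailed (ns : List Int) (p : Int × Int) : Bool :=
  decide (∃ n ∈ ns, p.1 ≤ n ∧ n ≤ p.2)

-- A's per-plank test on a sorted list is exactly pvNailed
lemma bisect_lt_iff (ns : List Int) (hs : ns.Pairwise (· ≤ ·)) (s e : Int) :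
    PySem.List.bisectLeft ns s < PySem.List.bisectRight ns e ↔ ∃ n ∈ ns, s ≤ n ∧ n ≤ e := by
  obtain ⟨hl_le, hl_lt, hl_ge⟩ := PySem.List.bisectLeft_spec ns s hs
  obtain ⟨hr_le, hr_le2, hr_gt⟩ := PySem.List.bisectRight_spec ns e hs
  constructor
  · intro h
    have hlen : PySem.List.bisectLeft ns s < ns.length := lt_of_lt_of_le h hr_le
    refine ⟨ns[PySem.List.bisectLeft ns s], List.getElem_mem _, ?_, ?_⟩
    · exact hl_ge _ hlen le_rfl
    · exact hr_le2 _ hlen h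
  · rintro ⟨n, hn, hsn, hne⟩
    obtain ⟨k, hk, rfl⟩ := List.mem_iff_getElem.1 hn
    have h1 : PySem.List.bisectLeft ns s ≤ k := by
      by_contra h
      exact absurd (hl_lt k hk (by omega)) (by omega)
    have h2 : k < PySem.List.bisectRight ns e := by
      by_contra h
      exact absurd (hr_gt k hk (by omega)) (by omega)
    omega

-- A's counter is the countP of the per-plank test
lemma A_count (planks : List (Int × Int)) (ns : List Int) (acc : Int) :
    planks.foldl (fun acc plank =>
      if lower_bound ns plank.1 < upper_bound ns plank.2 then acc + 1 else acc) acc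
    = acc + (planks.countP
        (fun p => decide (lower_bound ns p.1 < upper_bound ns p.2)) : Int) := by
  induction planks generalizing acc with
  | nil => simp
  | cons p t ih =>
    by_cases h : lower_bound ns p.1 < upper_bound ns p.2 <;>
      simp [h, ih]; ring

-- the advance loop: given everything before j is < s, the result j' keeps that
-- and everything from j' on is ≥ s
lemma pvAdvance_post (ns : List Int) (s : Int) (hs : ns.Pairwise (· ≤ ·)) (j : Nat)
    (hj : j ≤ ns.length) (hinv : ∀ i (hi : i < ns.length), i < j → ns[i] < s) :
    pvAdvance ns s j ≤ ns.length ∧ j ≤ pvAdvance ns s j ∧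
    (∀ i (hi : i < ns.length), i < pvAdvance ns s j → ns[i] < s) ∧
    (∀ i (hi : i < ns.length), pvAdvance ns s j ≤ i → s ≤ ns[i]) := by
  generalize hm : ns.length - j = m
  induction m generalizing j with
  | zero =>
    have hjl : j = ns.length := by omega
    rw [pvAdvance, dif_neg (by omega)]
    refine ⟨hj, le_rfl, hinv, ?_⟩
    intro i hi hji
    omega
  | succ m ih =>
    by_cases h : j < ns.length ∧ ns.getD j 0 < s
    · rw [pvAdvance, dif_pos h]
      obtain ⟨hlt, hval⟩ := h
      have hval' : ns[j] < s := by rwa [List.getD_eq_getElem ns 0 hlt] at hval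
      have := ih (j + 1) (by omega) (fun i hi hij => by
        rcases Nat.lt_or_ge i j with hij' | hij'
        · exact hinv i hi hij'
        · have : i = j := by omega
          subst this; exact hval') (by omega)
      exact ⟨this.1, by omega, this.2.2⟩
    · rw [pvAdvance, dif_neg h]
      refine ⟨hj, le_rfl, hinv, ?_⟩
      intro i hi hji
      have hjlen : j < ns.length := by omega
      have hns : ¬ ns.getD j 0 < s := fun hc => h ⟨hjlen, hc⟩
      rw [List.getD_eq_getElem ns 0 hjlen] at hns
      have hmono : ns[j] ≤ ns[i] := by
        rcases Nat.lt_or_ge j i with hji' | hji'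
        · exact (List.pairwise_iff_getElem.1 hs) j i (by omega) hi hji'
        · have : j = i := by omega
          subst this; exact le_rfl
      omega

-- B's sweep computes `b && all planks nailed`, for start-sorted planks
lemma B_loop (ns : List Int) (hs : ns.Pairwise (· ≤ ·)) :
    ∀ (sp : List (Int × Int)) (j : Nat) (b : Bool),
    sp.Pairwise (fun a c => a.1 ≤ c.1) → j ≤ ns.length →
    (∀ p ∈ sp, ∀ i (hi : i < ns.length), i < j → ns[i] < p.1) →
    (sp.foldl (fun (st : Nat × Bool) p =>
      let j := pvAdvance ns p.1 st.1
      (j, st.2 && (decide (j < ns.length) && decide (ns.getD j 0 ≤ p.2)))) (j, b)).2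
      = (b && sp.all (pvNailed ns)) := by
  intro sp
  induction sp with
  | nil => simp
  | cons p t ih =>
    intro j b hpw hj hinv
    have hinvp := hinv p (List.mem_cons_self) 
    obtain ⟨h1, h2, h3, h4⟩ := pvAdvance_post ns p.1 hs j hj hinvp
    set j' := pvAdvance ns p.1 j with hj'
    have hcond : (decide (j' < ns.length) && decide (ns.getD j' 0 ≤ p.2)) = pvNailed ns p := by
      rcases Nat.lt_or_ge j' ns.length with hlt | hge
      · rw [List.getD_eq_getElem ns 0 hlt]
        simp only [pvNailed, hlt, decide_true, Bool.true_and, decide_eq_decide]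
        constructor
        · intro hle
          exact ⟨ns[j'], List.getElem_mem _, h4 j' hlt le_rfl, hle⟩
        · rintro ⟨n, hn, hsn, hne⟩
          obtain ⟨k, hk, rfl⟩ := List.mem_iff_getElem.1 hn
          have hk' : j' ≤ k := by
            by_contra hc
            exact absurd (h3 k hk (by omega)) (by omega)
          calc ns[j'] ≤ ns[k] := by
                rcases Nat.lt_or_ge j' k with h | h
                · exact (List.pairwise_iff_getElem.1 hs) j' k hlt hk h
                · have : j' = k := by omega
                  subst this; exact le_rfl
            _ ≤ p.2 := hne
      · have hfalse : pvNailed ns p = false := by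
          simp only [pvNailed, decide_eq_false_iff_not]
          rintro ⟨n, hn, hsn, hne⟩
          obtain ⟨k, hk, rfl⟩ := List.mem_iff_getElem.1 hn
          exact absurd (h3 k hk (by omega)) (by omega)
        simp [hfalse, Nat.not_lt.2 hge]
    simp only [List.foldl_cons, List.all_cons]
    rw [ih j' (b && (decide (j' < ns.length) && decide (ns.getD j' 0 ≤ p.2)))
        (hpw.sublist (List.sublist_cons_self p t)) h1
        (fun q hq i hi hij' => lt_of_lt_of_le (h3 i hi hij')
          ((List.pairwise_cons.1 hpw).1 q hq)),
      hcond, Bool.and_assoc]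

-- both programs decide "every plank is nailed"
lemma A_eq_all (planks : List (Int × Int)) (nails : List Int) :
    all_planks_nailed planks nails
      = (planks.all (pvNailed (PySem.List.sorted nails (fun x => x)))) := by
  have hs : (PySem.List.sorted nails (fun x => x)).Pairwise (· ≤ ·) :=
    PySem.List.sorted_pairwise nails (fun x => x)
  simp only [all_planks_nailed]
  set ns := PySem.List.sorted nails (fun x => x) with hns
  rw [A_count planks ns 0, zero_add]
  rcases Bool.eq_false_or_eq_true (planks.all (pvNailed ns)) with hall | hall <;> rw [hall]
  · simp only [decide_eq_true_eq]
    have : ∀ p ∈ planks, (fun (p : Int × Int) =>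
        decide (lower_bound ns p.1 < upper_bound ns p.2)) p = true := by
      intro p hp
      have := List.all_eq_true.1 hall p hp
      simp only [pvNailed, decide_eq_true_eq] at this
      simpa using (bisect_lt_iff ns hs p.1 p.2).2 this
    rw [List.countP_eq_length.2 this]
  · simp only [decide_eq_false_iff_not]
    intro hc
    have hcnt : planks.countP (fun p => decide (lower_bound ns p.1 < upper_bound ns p.2))
        = planks.length := by exact_mod_cast hc
    have := List.countP_eq_length.1 hcnt
    have hall' : planks.all (pvNailed ns) = true := by
      rw [List.all_eq_true]
      intro p hp
      have := this p hp
      simp only [decide_eq_true_eq] at this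
      simpa [pvNailed] using (bisect_lt_iff ns hs p.1 p.2).1 this
    rw [hall] at hall'; exact Bool.false_ne_true hall'

lemma B_eq_all (planks : List (Int × Int)) (nails : List Int) :
    all_planks_nailed_alt planks nails
      = (planks.all (pvNailed (PySem.List.sorted nails (fun x => x)))) := by
  have hs : (PySem.List.sorted nails (fun x => x)).Pairwise (· ≤ ·) :=
    PySem.List.sorted_pairwise nails (fun x => x)
  simp only [all_planks_nailed_alt]
  set ns := PySem.List.sorted nails (fun x => x) with hns
  have hsp : (PySem.List.sorted planks (fun p => p.1)).Pairwise (fun a c => a.1 ≤ c.1) :=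
    PySem.List.sorted_pairwise planks (fun p => p.1)
  rw [B_loop ns hs (PySem.List.sorted planks (fun p => p.1)) 0 true hsp
      (Nat.zero_le _) (fun _ _ i _ h => absurd h (Nat.not_lt_zero i)), Bool.true_and]
  exact List.Perm.all_eq (PySem.List.sorted_perm planks (fun p => p.1) false)

-- ===== VERDICT (by name: the statement is the Claim_ definition above) =====
theorem all_planks_nailed_spec : Claim_equal_all_planks_nailed := by
  intro planks nails _
  unfold Spec_all_planks_nailed
  rw [A_eq_all, B_eq_all]
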